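-- pv_equiv track=rewrite | github.com/jeehun98/AI_framework-dev | graph_executor_v2/python/graph_executor_v2/layers/concat.py | _infer_out_shape
-- ===== SOURCE A (Python) =====
-- from typing import Iterable, List, Optional, Tuple, Any, Dict
--
-- def _norm_axis(axis: int, ndim: int) -> int:
--     if axis < 0:
--         axis += ndim
--     if not (0 <= axis < ndim):
--         raise ValueError(f"axis out of range: {axis} for ndim={ndim}")
--     return axis
--
-- def _infer_out_shape(shapes: List[Tuple[int, ...]], axis: int) -> Tuple[int, ...]:
--     if not shapes:
--         raise ValueError("Concat requires at least one input shape")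
--     ndim = len(shapes[0])
--     base = list(shapes[0])
--     axis = _norm_axis(axis, ndim)
--
--     cat = 0
--     for s in shapes:
--         if len(s) != ndim:
--             raise ValueError("all inputs must have same ndim")
--         for d in range(ndim):
--             if d == axis:
--                 continue
--             if s[d] != base[d]:
--                 raise ValueError("non-concat dims must match")
--         cat += int(s[axis])
--     base[axis] = cat
--     return tuple(base)
-- ===== SOURCE B (Python) =====
-- def _norm_axis(axis, ndim):
--     if axis < 0:
--         axis += ndim
--     if not (0 <= axis < ndim):
--         raise ValueError(f"axis out of range: {axis} for ndim={ndim}")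
--     return axis
--
-- def _infer_out_shape(shapes, axis):
--     if not shapes:
--         raise ValueError("Concat requires at least one input shape")
--     ndim = len(shapes[0])
--     axis = _norm_axis(axis, ndim)
--     if any(len(s) != ndim for s in shapes):
--         raise ValueError("all inputs must have same ndim")
--     # column-wise: cols[d] collects the d-th dimension of every shape
--     cols = [[s[d] for s in shapes] for d in range(ndim)]
--     for d in range(ndim):
--         if d != axis and len(set(cols[d])) != 1:
--             raise ValueError("non-concat dims must match")
--     return tuple(sum(cols[d]) if d == axis else cols[d][0] for d in range(ndim))
-- ===== Notes on version B (the rewrite author's own statement) =====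
-- stated objective: alternative
-- what changed: Transposes the shapes into per-dimension columns and works column-wise: validates each non-axis column by set-cardinality (len(set(col)) == 1) and builds the output per dimension (sum of the axis column, first element elsewhere), instead of A's row-wise pass that compares each shape against the first and mutates base[axis].
import Mathlib
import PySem

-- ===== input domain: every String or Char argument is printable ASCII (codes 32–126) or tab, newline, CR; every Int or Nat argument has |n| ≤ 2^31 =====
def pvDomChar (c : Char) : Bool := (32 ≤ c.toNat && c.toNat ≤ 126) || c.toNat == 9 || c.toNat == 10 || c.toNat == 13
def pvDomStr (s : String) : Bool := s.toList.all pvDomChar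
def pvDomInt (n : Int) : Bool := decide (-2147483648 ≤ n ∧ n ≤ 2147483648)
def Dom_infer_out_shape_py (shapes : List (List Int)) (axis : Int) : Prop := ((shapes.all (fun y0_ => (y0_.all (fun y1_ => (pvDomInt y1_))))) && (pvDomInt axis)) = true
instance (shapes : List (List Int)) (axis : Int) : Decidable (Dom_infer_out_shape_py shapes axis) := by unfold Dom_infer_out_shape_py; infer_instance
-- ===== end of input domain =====

-- B works column-wise on the transposed shapes (set-cardinality check per non-axis column,
-- output built per dimension) instead of A's row-wise pass mutating base[axis]; same
-- exceptions on the same inputs (Pre_ excludes them all).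

-- ===== PORT A =====
-- _norm_axis: none = ValueError "axis out of range"
def norm_axis_py (axis : Int) (ndim : Int) : Option Int :=
  let axis := if axis < 0 then axis + ndim else axis
  if 0 ≤ axis ∧ axis < ndim then some axis else none

def infer_out_shape_py (shapes : List (List Int)) (axis : Int) : List Int :=
  match shapes with
  | [] => []  -- raise, excluded by Pre_
  | s0 :: _ =>
    let ndim : Int := s0.length
    let base := s0
    match norm_axis_py axis ndim with
    | none => []  -- raise, excluded by Pre_
    | some ax =>
      -- the loop: cat accumulated; none = one of the two raises inside the loop
      let cat? : Option Int := shapes.foldl (fun acc s =>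
        acc.bind (fun cat =>
          if (s.length : Int) ≠ ndim then none
          else if (List.range s0.length).all (fun d =>
                   decide ((d : Int) = ax) ||
                   -- s[d], base[d]: d < ndim = len s = len base, so getD is exact
                   decide (s.getD d 0 = base.getD d 0)) then
            some (cat + s.getD ax.toNat 0)  -- s[axis]: 0 ≤ ax < len s
          else none)) (some 0)
      match cat? with
      | none => []  -- raise, excluded by Pre_
      | some cat => base.set ax.toNat cat  -- base[axis] = cat; tuple(base)

-- ===== PORT B =====
def norm_axis_alt (axis : Int) (ndim : Int) : Option Int :=
  let axis := if axis < 0 then axis + ndim else axis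
  if 0 ≤ axis ∧ axis < ndim then some axis else none

def infer_out_shape_py_alt (shapes : List (List Int)) (axis : Int) : List Int :=
  match shapes with
  | [] => []  -- raise, excluded by Pre_
  | s0 :: _ =>
    let ndim := s0.length
    match norm_axis_alt axis (ndim : Int) with
    | none => []  -- raise, excluded by Pre_
    | some ax =>
      if shapes.any (fun s => decide ((s.length : Int) ≠ (ndim : Int))) then []  -- raise "same ndim"
      else
        -- cols[d] = [s[d] for s in shapes]; d < ndim = len s after the length check, so getD is exact
        let cols := (List.range ndim).map (fun d => shapes.map (fun s => s.getD d 0))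
        if (List.range ndim).any (fun (d : Nat) =>
             decide (((d : Int)) ≠ ax) && decide ((PySem.Set.ofList (cols.getD d [])).length ≠ 1))
        then []  -- raise "non-concat dims must match"
        else (List.range ndim).map (fun (d : Nat) =>
          if ((d : Int)) = ax then (cols.getD d []).sum else (cols.getD d []).headD 0)

-- ===== PRECONDITION & SPEC =====
-- Pre_ excludes exactly the inputs on which A raises ValueError (empty shapes, axis out of
-- range, ndim mismatch, non-concat dim mismatch); B raises the same exceptions there.
def Pre_infer_out_shape_py (shapes : List (List Int)) (axis : Int) : Prop :=
  shapes ≠ [] ∧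
  (let s0 := shapes.headD []
   let ndim : Int := s0.length
   let ax := if axis < 0 then axis + ndim else axis
   0 ≤ ax ∧ ax < ndim ∧
   ∀ s ∈ shapes, s.length = s0.length ∧
     ∀ d ∈ List.range s0.length, (d : Int) ≠ ax → s.getD d 0 = s0.getD d 0)
instance (shapes : List (List Int)) (axis : Int) : Decidable (Pre_infer_out_shape_py shapes axis) := by unfold Pre_infer_out_shape_py; infer_instance

def pvWitness_infer_out_shape_py : List (List Int) × Int := ([[2, 3], [5, 3]], 0)

def Spec_infer_out_shape_py (shapes : List (List Int)) (axis : Int) (out : List Int) : Prop := out = infer_out_shape_py_alt shapes axis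
instance (shapes : List (List Int)) (axis : Int) (out : List Int) : Decidable (Spec_infer_out_shape_py shapes axis out) := by unfold Spec_infer_out_shape_py; infer_instance

-- ===== CLAIM (what is proved, stated in full; the proofs are below) =====
def Claim_equal_infer_out_shape_py : Prop := ∀ (shapes : List (List Int)) (axis : Int), Dom_infer_out_shape_py shapes axis → Pre_infer_out_shape_py shapes axis → Spec_infer_out_shape_py shapes axis (infer_out_shape_py shapes axis)

-- ===== LEMMAS AND PROOFS =====

-- per-element condition extracted from Pre_
def okShape (s0 s : List Int) (ax : Int) : Prop :=
  s.length = s0.length ∧ ∀ d ∈ List.range s0.length, (d : Int) ≠ ax → s.getD d 0 = s0.getD d 0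

-- under okShape, A's per-dimension all-check passes
lemma allcheck_true {s0 s : List Int} {ax : Int} (h : okShape s0 s ax) :
    (List.range s0.length).all (fun d =>
      decide ((d : Int) = ax) || decide (s.getD d 0 = s0.getD d 0)) = true := by
  obtain ⟨hl, hd⟩ := h
  rw [List.all_eq_true]
  intro d hdm
  by_cases he : (d : Int) = ax
  · simp [he]
  · have h' := hd d hdm he
    simp only [List.getD_eq_getElem?_getD] at h'
    simp [he, h']

-- A's fold computes the plain left sum of the axis entries
lemma foldA_eq_sum (s0 : List Int) (ax : Int) (l : List (List Int))
    (hok : ∀ s ∈ l, okShape s0 s ax) (c : Int) :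
    l.foldl (fun acc s =>
      acc.bind (fun cat =>
        if (s.length : Int) ≠ (s0.length : Int) then none
        else if (List.range s0.length).all (fun d =>
                 decide ((d : Int) = ax) || decide (s.getD d 0 = s0.getD d 0)) then
          some (cat + s.getD ax.toNat 0)
        else none)) (some c)
    = some (c + (l.map (fun s => s.getD ax.toNat 0)).sum) := by
  induction l generalizing c with
  | nil => simp
  | cons s t ih =>
    have hs := hok s (by simp)
    have hlen : (s.length : Int) = (s0.length : Int) := by exact_mod_cast hs.1
    simp only [List.foldl_cons, Option.bind_some]
    rw [if_neg (by simp [hlen]), if_pos (allcheck_true hs),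
        ih (fun x hx => hok x (by simp [hx]))]
    simp only [List.map_cons, List.sum_cons]
    congr 1
    ring

-- folding Set.add over a constant list keeps the singleton
lemma foldl_add_const {x : Int} (t : List Int) (h : ∀ y ∈ t, y = x) :
    t.foldl PySem.Set.add [x] = [x] := by
  induction t with
  | nil => rfl
  | cons a u ih =>
    have ha : a = x := h a (by simp)
    simp only [List.foldl_cons, ha]
    have hadd : PySem.Set.add [x] x = [x] := by
      simp [PySem.Set.add, PySem.Set.contains]
    rw [hadd]
    exact ih (fun y hy => h y (by simp [hy]))

-- a nonempty constant list dedups to a singleton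
lemma ofList_const {x : Int} {l : List Int} (h : ∀ y ∈ l, y = x) (hne : l ≠ []) :
    PySem.Set.ofList l = [x] := by
  cases l with
  | nil => exact absurd rfl hne
  | cons a t =>
    have ha : a = x := h a (by simp)
    rw [PySem.Set.ofList_eq_foldl]
    simp only [List.foldl_cons, ha]
    have hadd0 : PySem.Set.add ([] : List Int) x = [x] := by
      simp [PySem.Set.add, PySem.Set.contains]
    rw [hadd0]
    exact foldl_add_const t (fun y hy => h y (by simp [hy]))

-- ===== VERDICT (by name: the statement is the Claim_ definition above) =====
theorem infer_out_shape_py_spec : Claim_equal_infer_out_shape_py := by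
  intro shapes axis _ hpre
  obtain ⟨hne, hpre⟩ := hpre
  match shapes with
  | [] => exact absurd rfl hne
  | s0 :: rest =>
    simp only [List.headD_cons] at hpre
    obtain ⟨h0, h1, hok⟩ := hpre
    unfold Spec_infer_out_shape_py infer_out_shape_py infer_out_shape_py_alt
    simp only [norm_axis_py, norm_axis_alt]
    set ax := if axis < 0 then axis + (s0.length : Int) else axis with hax
    rw [if_pos ⟨h0, h1⟩]
    simp only []
    -- A side: the fold succeeds with the plain sum
    rw [foldA_eq_sum s0 ax (s0 :: rest) (fun s hs => (hok s hs : okShape s0 s ax)) 0]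
    -- B side: the length check passes
    have hanylen : ((s0 :: rest).any (fun s => decide ((s.length : Int) ≠ (s0.length : Int)))) = false := by
      simp only [List.any_eq_false]
      intro s hs
      have := (hok s hs).1
      simp [this]
    rw [if_neg (by rw [hanylen]; exact Bool.false_ne_true)]
    -- abbreviations
    have haxnat : ax = ((ax.toNat : Nat) : Int) := by omega
    have haxlt : ax.toNat < s0.length := by omega
    set a := ax.toNat with ha
    -- cols.getD d [] for d < ndim
    have hcol : ∀ d, d < s0.length →
        ((List.range s0.length).map (fun d => (s0 :: rest).map (fun s => s.getD d 0))).getD d []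
          = (s0 :: rest).map (fun s => s.getD d 0) := by
      intro d hd
      rw [List.getD_eq_getElem _ _ (by simp [hd])]
      simp
    -- B side: the column-uniformity check passes
    have hcheck : ((List.range s0.length).any (fun (d : Nat) =>
        decide (((d : Int)) ≠ ax) && decide ((PySem.Set.ofList
          (((List.range s0.length).map (fun d => (s0 :: rest).map (fun s => s.getD d 0))).getD d [])).length ≠ 1))) = false := by
      simp only [List.any_eq_false]
      intro d hd
      have hdlt : d < s0.length := List.mem_range.mp hd
      by_cases he : (d : Int) = ax
      · simp [he]
      · rw [hcol d hdlt]
        have hconst : ∀ y ∈ (s0 :: rest).map (fun s => s.getD d 0), y = s0.getD d 0 := by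
          intro y hy
          obtain ⟨s, hs, rfl⟩ := List.mem_map.mp hy
          exact (hok s hs).2 d hd he
        rw [ofList_const hconst (by simp)]
        simp [he]
    rw [if_neg (by rw [hcheck]; exact Bool.false_ne_true)]
    -- now both sides are explicit lists; compare elementwise
    apply List.ext_getElem
    · simp
    · intro i hi1 hi2
      have hilen : i < s0.length := by simpa using hi1
      rw [List.getElem_map, List.getElem_range]
      simp only []
      rw [hcol i hilen]
      by_cases he : (i : Int) = ax
      · have hia : i = a := by omega
        subst hia
        rw [if_pos he, List.getElem_set_self]
        simp [List.getD_eq_getElem?_getD]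
      · have hia : i ≠ a := by omega
        rw [if_neg he, List.getElem_set_ne (by omega)]
        simp only [List.map_cons, List.headD_cons]
        rw [List.getD_eq_getElem _ _ hilen]
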